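-- pv_equiv track=rewrite | github.com/Micaeka1/Battleships-Python- | battleships.py | is_open_sea
-- ===== SOURCE A (Python) =====
-- def is_open_sea(row,column,fleet):
--     if fleet == []:
--         return True
--     all_ship_coordinates = set()
--     for elem in fleet:
--         hor = elem[2]
--         l = elem[3]
--         all_ship_coordinates.add((elem[0],elem[1]))
--         i = 1
--         if hor == True:
--             while i < l:
--                 all_ship_coordinates.add((elem[0],elem[1]+i))
--                 i += 1
--         else:
--             while i < l:
--                 all_ship_coordinates.add((elem[0]+i,elem[1]))
--                 i += 1
--
--     for elem in all_ship_coordinates: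
--         if abs(row-elem[0]) <= 1 and abs(column - elem[1]) <= 1:
--                 return False
--     return True
-- ===== SOURCE B (Python) =====
-- def is_open_sea(row, column, fleet):
--     for r, c, hor, l in fleet:
--         span = l if l > 1 else 1
--         if hor:
--             if r - 1 <= row <= r + 1 and c - 1 <= column <= c + span:
--                 return False
--         else:
--             if r - 1 <= row <= r + span and c - 1 <= column <= c + 1:
--                 return False
--     return True
-- ===== Notes on version B (the rewrite author's own statement) =====
-- stated objective: faster
-- what changed: Instead of materialising every occupied cell of every ship in a set and scanning it, B checks the queried cell against each ship's 1-cell-inflated bounding box with four integer comparisons per ship.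
import Mathlib
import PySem

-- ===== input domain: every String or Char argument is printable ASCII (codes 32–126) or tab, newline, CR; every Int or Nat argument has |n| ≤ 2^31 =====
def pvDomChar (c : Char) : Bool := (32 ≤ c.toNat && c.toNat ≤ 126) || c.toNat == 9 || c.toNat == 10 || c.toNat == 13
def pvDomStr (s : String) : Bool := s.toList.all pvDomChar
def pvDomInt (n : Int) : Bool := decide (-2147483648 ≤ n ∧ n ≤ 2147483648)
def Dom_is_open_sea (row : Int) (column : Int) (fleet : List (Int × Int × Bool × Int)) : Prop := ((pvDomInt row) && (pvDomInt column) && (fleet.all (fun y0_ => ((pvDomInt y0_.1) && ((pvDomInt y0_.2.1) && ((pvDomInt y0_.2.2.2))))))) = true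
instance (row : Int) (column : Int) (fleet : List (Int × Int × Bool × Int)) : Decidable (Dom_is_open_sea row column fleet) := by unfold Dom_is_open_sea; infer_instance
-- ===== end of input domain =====

-- B replaces A's materialisation of every occupied cell in a set by a four-comparison
-- inflated-bounding-box test per ship (objective: faster, O(ships) vs O(total ship cells)).

-- ===== PORT A =====
-- Python's set is ported as Std.HashSet (exact set semantics, O(1) add, so the port
-- evaluates on large ships); it is consumed only by an order-independent existence check.
-- while i < l: add (r, c+i); i += 1   (horizontal arm)
def pvAddHor (r c : Int) (i l : Int) (s : Std.HashSet (Int × Int)) : Std.HashSet (Int × Int) :=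
  if i < l then pvAddHor r c (i + 1) l (s.insert (r, c + i)) else s
termination_by (l - i).toNat
decreasing_by omega

-- while i < l: add (r+i, c); i += 1   (vertical arm)
def pvAddVer (r c : Int) (i l : Int) (s : Std.HashSet (Int × Int)) : Std.HashSet (Int × Int) :=
  if i < l then pvAddVer r c (i + 1) l (s.insert (r + i, c)) else s
termination_by (l - i).toNat
decreasing_by omega

def is_open_sea (row : Int) (column : Int) (fleet : List (Int × Int × Bool × Int)) : Bool :=
  if fleet = [] then true
  else
    let all_ship_coordinates : Std.HashSet (Int × Int) :=
      fleet.foldl (fun s elem =>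
        let s := s.insert (elem.1, elem.2.1)
        if elem.2.2.1 = true then pvAddHor elem.1 elem.2.1 1 elem.2.2.2 s
        else pvAddVer elem.1 elem.2.1 1 elem.2.2.2 s) Std.HashSet.emptyWithCapacity
    -- second loop: return False on the first close cell; the result (an existence
    -- check) does not depend on the set's iteration order
    if all_ship_coordinates.toList.any (fun e =>
        decide (|row - e.1| ≤ 1) && decide (|column - e.2| ≤ 1)) then false
    else true

-- ===== PORT B =====
def is_open_sea_alt (row : Int) (column : Int) (fleet : List (Int × Int × Bool × Int)) : Bool :=
  match fleet with
  | [] => true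
  | (r, c, hor, l) :: rest =>
    let span := if l > 1 then l else 1
    if hor then
      if r - 1 ≤ row ∧ row ≤ r + 1 ∧ c - 1 ≤ column ∧ column ≤ c + span then false
      else is_open_sea_alt row column rest
    else
      if r - 1 ≤ row ∧ row ≤ r + span ∧ c - 1 ≤ column ∧ column ≤ c + 1 then false
      else is_open_sea_alt row column rest

-- ===== PRECONDITION & SPEC =====
def Spec_is_open_sea (row : Int) (column : Int) (fleet : List (Int × Int × Bool × Int)) (out : Bool) : Prop := out = is_open_sea_alt row column fleet
instance (row : Int) (column : Int) (fleet : List (Int × Int × Bool × Int)) (out : Bool) : Decidable (Spec_is_open_sea row column fleet out) := by unfold Spec_is_open_sea; infer_instance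

-- ===== CLAIM (what is proved, stated in full; the proofs are below) =====
def Claim_equal_is_open_sea : Prop := ∀ (row : Int) (column : Int) (fleet : List (Int × Int × Bool × Int)), Dom_is_open_sea row column fleet → Spec_is_open_sea row column fleet (is_open_sea row column fleet)

-- ===== LEMMAS AND PROOFS =====

-- a queried cell is "close" to an occupied cell
def pvClose (row column : Int) (p : Int × Int) : Prop :=
  |row - p.1| ≤ 1 ∧ |column - p.2| ≤ 1

-- the cells a ship occupies, as A enumerates them (head plus i = 1 .. l-1)
def pvOcc (e : Int × Int × Bool × Int) (p : Int × Int) : Prop :=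
  ∃ j : Int, 0 ≤ j ∧ j < max e.2.2.2 1 ∧
    (if e.2.2.1 then p = (e.1, e.2.1 + j) else p = (e.1 + j, e.2.1))

theorem mem_pvAddHor (r c i l : Int) (s : Std.HashSet (Int × Int)) (p : Int × Int) :
    p ∈ pvAddHor r c i l s ↔ p ∈ s ∨ ∃ j : Int, i ≤ j ∧ j < l ∧ p = (r, c + j) := by
  fun_induction pvAddHor r c i l s with
  | case1 i s h ih =>
    rw [ih]
    simp only [Std.HashSet.mem_insert, beq_iff_eq]
    constructor
    · rintro (⟨he | hs⟩ | ⟨j, h1, h2, h3⟩)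
      · exact Or.inr ⟨i, le_refl _, h, he.symm⟩
      · exact Or.inl hs
      · exact Or.inr ⟨j, by omega, h2, h3⟩
    · rintro (hs | ⟨j, h1, h2, h3⟩)
      · exact Or.inl (Or.inr hs)
      · by_cases hj : j = i
        · exact Or.inl (Or.inl (by simpa [hj] using h3.symm))
        · exact Or.inr ⟨j, by omega, h2, h3⟩
  | case2 i s h =>
    constructor
    · exact Or.inl
    · rintro (hs | ⟨j, h1, h2, _⟩)
      · exact hs
      · omega

theorem mem_pvAddVer (r c i l : Int) (s : Std.HashSet (Int × Int)) (p : Int × Int) :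
    p ∈ pvAddVer r c i l s ↔ p ∈ s ∨ ∃ j : Int, i ≤ j ∧ j < l ∧ p = (r + j, c) := by
  fun_induction pvAddVer r c i l s with
  | case1 i s h ih =>
    rw [ih]
    simp only [Std.HashSet.mem_insert, beq_iff_eq]
    constructor
    · rintro (⟨he | hs⟩ | ⟨j, h1, h2, h3⟩)
      · exact Or.inr ⟨i, le_refl _, h, he.symm⟩
      · exact Or.inl hs
      · exact Or.inr ⟨j, by omega, h2, h3⟩
    · rintro (hs | ⟨j, h1, h2, h3⟩)
      · exact Or.inl (Or.inr hs)
      · by_cases hj : j = i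
        · exact Or.inl (Or.inl (by simpa [hj] using h3.symm))
        · exact Or.inr ⟨j, by omega, h2, h3⟩
  | case2 i s h =>
    constructor
    · exact Or.inl
    · rintro (hs | ⟨j, h1, h2, _⟩)
      · exact hs
      · omega

-- one ship's step in A's fold adds exactly the cells pvOcc describes
theorem mem_step (e : Int × Int × Bool × Int) (s : Std.HashSet (Int × Int)) (p : Int × Int) :
    (p ∈ (if e.2.2.1 = true then pvAddHor e.1 e.2.1 1 e.2.2.2 (s.insert (e.1, e.2.1))
          else pvAddVer e.1 e.2.1 1 e.2.2.2 (s.insert (e.1, e.2.1)))) ↔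
    p ∈ s ∨ pvOcc e p := by
  obtain ⟨r, c, hor, l⟩ := e
  cases hor <;>
    simp only [pvOcc, Bool.false_eq_true, if_false, if_true, mem_pvAddHor, mem_pvAddVer,
      Std.HashSet.mem_insert, beq_iff_eq] <;>
    constructor
  · rintro ((he | hs) | ⟨j, h1, h2, h3⟩)
    · exact Or.inr ⟨0, by omega, by omega, by simpa using he.symm⟩
    · exact Or.inl hs
    · exact Or.inr ⟨j, by omega, by omega, by simpa using h3⟩
  · rintro (hs | ⟨j, h1, h2, h3⟩)
    · exact Or.inl (Or.inr hs)
    · by_cases hj : j = 0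
      · exact Or.inl (Or.inl (by simp [hj] at h3; simp [h3]))
      · exact Or.inr ⟨j, by omega, by omega, by simpa using h3⟩
  · rintro ((he | hs) | ⟨j, h1, h2, h3⟩)
    · exact Or.inr ⟨0, by omega, by omega, by simpa using he.symm⟩
    · exact Or.inl hs
    · exact Or.inr ⟨j, by omega, by omega, by simpa using h3⟩
  · rintro (hs | ⟨j, h1, h2, h3⟩)
    · exact Or.inl (Or.inr hs)
    · by_cases hj : j = 0
      · exact Or.inl (Or.inl (by simp [hj] at h3; simp [h3]))
      · exact Or.inr ⟨j, by omega, by omega, by simpa using h3⟩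

-- membership in A's accumulated set, over the whole fleet
theorem mem_fold (fleet : List (Int × Int × Bool × Int)) (s : Std.HashSet (Int × Int)) (p : Int × Int) :
    (p ∈ fleet.foldl (fun s elem =>
        if elem.2.2.1 = true then pvAddHor elem.1 elem.2.1 1 elem.2.2.2 (s.insert (elem.1, elem.2.1))
        else pvAddVer elem.1 elem.2.1 1 elem.2.2.2 (s.insert (elem.1, elem.2.1))) s) ↔
    p ∈ s ∨ ∃ e ∈ fleet, pvOcc e p := by
  induction fleet generalizing s with
  | nil => simp
  | cons e rest ih =>
    simp only [List.foldl_cons, ih, mem_step, List.mem_cons]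
    constructor
    · rintro ((hs | ho) | ⟨e', he', ho'⟩)
      · exact Or.inl hs
      · exact Or.inr ⟨e, Or.inl rfl, ho⟩
      · exact Or.inr ⟨e', Or.inr he', ho'⟩
    · rintro (hs | ⟨e', (rfl | he'), ho'⟩)
      · exact Or.inl (Or.inl hs)
      · exact Or.inl (Or.inr ho')
      · exact Or.inr ⟨e', he', ho'⟩

-- per-ship equivalence: some occupied cell is close ↔ the inflated box contains the query
theorem occ_close_iff_box (row column : Int) (e : Int × Int × Bool × Int) :
    (∃ p, pvOcc e p ∧ pvClose row column p) ↔
    (if e.2.2.1 then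
      e.1 - 1 ≤ row ∧ row ≤ e.1 + 1 ∧ e.2.1 - 1 ≤ column ∧ column ≤ e.2.1 + (if e.2.2.2 > 1 then e.2.2.2 else 1)
     else
      e.1 - 1 ≤ row ∧ row ≤ e.1 + (if e.2.2.2 > 1 then e.2.2.2 else 1) ∧ e.2.1 - 1 ≤ column ∧ column ≤ e.2.1 + 1) := by
  obtain ⟨r, c, hor, l⟩ := e
  cases hor <;> simp only [pvOcc, pvClose, Bool.false_eq_true, if_false, if_true] <;> constructor
  · rintro ⟨p, ⟨j, h1, h2, rfl⟩, h3, h4⟩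
    rw [abs_le] at h3 h4
    simp only at h3 h4
    omega
  · intro h
    refine ⟨(r + min (max (row - r) 0) ((if l > 1 then l else 1) - 1), c),
      ⟨min (max (row - r) 0) ((if l > 1 then l else 1) - 1), by omega, by omega, rfl⟩, ?_, ?_⟩ <;>
      rw [abs_le] <;> simp only <;> omega
  · rintro ⟨p, ⟨j, h1, h2, rfl⟩, h3, h4⟩
    rw [abs_le] at h3 h4
    simp only at h3 h4
    omega
  · intro h
    refine ⟨(r, c + min (max (column - c) 0) ((if l > 1 then l else 1) - 1)),
      ⟨min (max (column - c) 0) ((if l > 1 then l else 1) - 1), by omega, by omega, rfl⟩, ?_, ?_⟩ <;>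
      rw [abs_le] <;> simp only <;> omega

-- the per-ship inflated bounding-box condition B tests
def pvBox (row column : Int) (e : Int × Int × Bool × Int) : Prop :=
  if e.2.2.1 then
    e.1 - 1 ≤ row ∧ row ≤ e.1 + 1 ∧ e.2.1 - 1 ≤ column ∧ column ≤ e.2.1 + (if e.2.2.2 > 1 then e.2.2.2 else 1)
  else
    e.1 - 1 ≤ row ∧ row ≤ e.1 + (if e.2.2.2 > 1 then e.2.2.2 else 1) ∧ e.2.1 - 1 ≤ column ∧ column ≤ e.2.1 + 1

-- B returns false iff some ship's inflated box contains the query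
theorem alt_eq_false_iff (row column : Int) (fleet : List (Int × Int × Bool × Int)) :
    is_open_sea_alt row column fleet = false ↔ ∃ e ∈ fleet, pvBox row column e := by
  induction fleet with
  | nil => simp [is_open_sea_alt]
  | cons e rest ih =>
    obtain ⟨r, c, hor, l⟩ := e
    cases hor
    · simp only [is_open_sea_alt, Bool.false_eq_true, if_false]
      by_cases h : r - 1 ≤ row ∧ (row ≤ r + if l > 1 then l else 1) ∧ c - 1 ≤ column ∧ column ≤ c + 1
      · rw [if_pos h]
        refine iff_of_true rfl ⟨(r, c, false, l), List.mem_cons_self, ?_⟩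
        simpa [pvBox] using h
      · rw [if_neg h, ih]
        constructor
        · rintro ⟨e, he, hb⟩; exact ⟨e, List.mem_cons_of_mem _ he, hb⟩
        · rintro ⟨e, he, hb⟩
          rcases List.mem_cons.mp he with rfl | he'
          · exact absurd (by simpa [pvBox] using hb) h
          · exact ⟨e, he', hb⟩
    · simp only [is_open_sea_alt, if_true]
      by_cases h : r - 1 ≤ row ∧ row ≤ r + 1 ∧ c - 1 ≤ column ∧ column ≤ c + if l > 1 then l else 1
      · rw [if_pos h]
        refine iff_of_true rfl ⟨(r, c, true, l), List.mem_cons_self, ?_⟩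
        simpa [pvBox] using h
      · rw [if_neg h, ih]
        constructor
        · rintro ⟨e, he, hb⟩; exact ⟨e, List.mem_cons_of_mem _ he, hb⟩
        · rintro ⟨e, he, hb⟩
          rcases List.mem_cons.mp he with rfl | he'
          · exact absurd (by simpa [pvBox] using hb) h
          · exact ⟨e, he', hb⟩

-- A returns false iff some occupied cell is close
theorem a_eq_false_iff (row column : Int) (fleet : List (Int × Int × Bool × Int)) :
    is_open_sea row column fleet = false ↔
    ∃ e ∈ fleet, ∃ p, pvOcc e p ∧ pvClose row column p := by
  by_cases hf : fleet = []
  · simp [is_open_sea, hf]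
  · rw [show is_open_sea row column fleet =
        (if ((fleet.foldl (fun s elem =>
            if elem.2.2.1 = true then pvAddHor elem.1 elem.2.1 1 elem.2.2.2 (s.insert (elem.1, elem.2.1))
            else pvAddVer elem.1 elem.2.1 1 elem.2.2.2 (s.insert (elem.1, elem.2.1)))
            Std.HashSet.emptyWithCapacity).toList.any
            (fun e => decide (|row - e.1| ≤ 1) && decide (|column - e.2| ≤ 1)) : Bool) then false else true)
      from by simp only [is_open_sea, if_neg hf]]
    split_ifs with h
    · rw [List.any_eq_true] at h
      obtain ⟨p, hp, hcl⟩ := h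
      rw [Std.HashSet.mem_toList, mem_fold] at hp
      simp only [Bool.and_eq_true, decide_eq_true_eq] at hcl
      rcases hp with hp | ⟨e, he, ho⟩
      · exact absurd hp (by simp)
      · exact iff_of_true rfl ⟨e, he, p, ho, hcl.1, hcl.2⟩
    · rw [List.any_eq_true] at h
      refine iff_of_false (by simp) ?_
      rintro ⟨e, he, p, ho, hcl⟩
      refine h ⟨p, ?_, ?_⟩
      · rw [Std.HashSet.mem_toList, mem_fold]; exact Or.inr ⟨e, he, ho⟩
      · simp only [Bool.and_eq_true, decide_eq_true_eq]
        exact ⟨hcl.1, hcl.2⟩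

-- ===== VERDICT (by name: the statement is the Claim_ definition above) =====
theorem is_open_sea_spec : Claim_equal_is_open_sea := by
  intro row column fleet _
  unfold Spec_is_open_sea
  have key : is_open_sea row column fleet = false ↔ is_open_sea_alt row column fleet = false := by
    rw [a_eq_false_iff, alt_eq_false_iff]
    constructor
    · rintro ⟨e, he, hp⟩
      refine ⟨e, he, ?_⟩
      have := (occ_close_iff_box row column e).mp hp
      simpa [pvBox] using this
    · rintro ⟨e, he, hb⟩
      exact ⟨e, he, (occ_close_iff_box row column e).mpr (by simpa [pvBox] using hb)⟩
  cases hx : is_open_sea row column fleet <;> cases hy : is_open_sea_alt row column fleet <;>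
    simp_all
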